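-- pv_equiv track=rewrite | github.com/thrinaibatchu/problem_solving | Meta Puzzles/return_smallest_key.py | return_smallest_key
-- ===== SOURCE A (Python) =====
-- from collections import defaultdict
--
-- def return_smallest_key(inputDict, n):
--     if len(inputDict) == 0 or n <= 0:
--         return None
--
--     # Group keys by their value
--     reverse_map = defaultdict(list)
--     for key, value in inputDict.items():
--         reverse_map[value].append(key)
--
--     # Sort keys in each value group for lexicographical order
--     for key in reverse_map:
--         reverse_map[key].sort()
--
--     # Get sorted list of unique values
--     sorted_values = sorted(reverse_map.keys())
--
--     if n > len(sorted_values):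
--         return None
--
--     # Return the first key from the n-th smallest value's list
--     return reverse_map[sorted_values[n - 1]][0]
-- ===== SOURCE B (Python) =====
-- def return_smallest_key(inputDict, n):
--     if len(inputDict) == 0 or n <= 0:
--         return None
--     vals = sorted(set(inputDict.values()))
--     if n > len(vals):
--         return None
--     target = vals[n - 1]
--     return min(k for k, v in inputDict.items() if v == target)
-- ===== Notes on version B (the rewrite author's own statement) =====
-- stated objective: simpler
-- what changed: Replaces the reverse multimap (group keys by value, sort every key group, index into the sorted group) with a deduplicated value sort plus one filtered min-scan over the items for the n-th smallest value.
import Mathlib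
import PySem

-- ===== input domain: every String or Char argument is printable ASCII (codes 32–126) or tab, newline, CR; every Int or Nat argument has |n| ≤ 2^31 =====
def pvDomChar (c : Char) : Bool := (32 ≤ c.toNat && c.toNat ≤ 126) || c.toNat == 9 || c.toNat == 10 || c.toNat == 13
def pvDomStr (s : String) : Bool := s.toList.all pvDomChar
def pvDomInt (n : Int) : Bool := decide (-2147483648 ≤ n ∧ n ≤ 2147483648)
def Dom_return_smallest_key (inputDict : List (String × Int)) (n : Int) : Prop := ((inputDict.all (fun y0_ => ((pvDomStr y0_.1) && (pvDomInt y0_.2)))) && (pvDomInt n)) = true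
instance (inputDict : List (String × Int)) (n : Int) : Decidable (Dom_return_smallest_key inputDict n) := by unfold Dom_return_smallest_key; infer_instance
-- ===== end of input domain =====

-- B scraps A's build-reverse-map-then-sort-each-group scheme for a dedup value sort plus one filtered min-scan (simpler).

-- ===== PORT A =====
def return_smallest_key (inputDict : List (String × Int)) (n : Int) : Option String :=
  let d := PySem.Dict.ofList inputDict
  if d.size = 0 ∨ n ≤ 0 then none
  else
    -- reverse_map = defaultdict(list); for key, value in inputDict.items(): reverse_map[value].append(key)
    let rm : PySem.Dict Int (List String) :=
      d.items.foldl (fun rm p => rm.modify p.2 [] (· ++ [p.1])) PySem.Dict.empty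
    -- for key in reverse_map: reverse_map[key].sort()
    let rm2 := rm.keys.foldl (fun acc k => acc.insert k (PySem.List.sorted (acc.getD k []) (fun x => x) false)) rm
    let sorted_values := PySem.List.sorted rm2.keys (fun x => x) false
    if n > (sorted_values.length : Int) then none
    else
      match PySem.List.pyGet? sorted_values (n - 1) with
      | none => none   -- unreachable IndexError
      | some v => PySem.List.pyGet? (rm2.getD v []) 0

-- ===== PORT B =====
def return_smallest_key_alt (inputDict : List (String × Int)) (n : Int) : Option String :=
  let d := PySem.Dict.ofList inputDict
  if d.size = 0 ∨ n ≤ 0 then none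
  else
    let vals := PySem.List.sorted (PySem.Set.ofList d.values) (fun x => x) false
    if n > (vals.length : Int) then none
    else
      match PySem.List.pyGet? vals (n - 1) with
      | none => none   -- unreachable IndexError
      | some target =>
          PySem.List.min? ((d.items.filter (fun p => p.2 == target)).map (·.1)) (fun x => x)

-- ===== PRECONDITION & SPEC =====
def Spec_return_smallest_key (inputDict : List (String × Int)) (n : Int) (out : Option String) : Prop := out = return_smallest_key_alt inputDict n
instance (inputDict : List (String × Int)) (n : Int) (out : Option String) : Decidable (Spec_return_smallest_key inputDict n out) := by unfold Spec_return_smallest_key; infer_instance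

-- ===== CLAIM (what is proved, stated in full; the proofs are below) =====
def Claim_equal_return_smallest_key : Prop := ∀ (inputDict : List (String × Int)) (n : Int), Dom_return_smallest_key inputDict n → Spec_return_smallest_key inputDict n (return_smallest_key inputDict n)

-- ===== LEMMAS AND PROOFS =====

-- sort-loop lemma
lemma getD_sortloop (ks : List Int) (rm : PySem.Dict Int (List String)) (t : Int) (hnd : ks.Nodup) :
    (ks.foldl (fun acc k => acc.insert k (PySem.List.sorted (acc.getD k []) (fun x => x) false)) rm).getD t []
    = if t ∈ ks then PySem.List.sorted (rm.getD t []) (fun x => x) false else rm.getD t [] := by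
  induction ks generalizing rm with
  | nil => simp
  | cons k ks ih =>
    simp only [List.foldl_cons]
    rw [ih _ (hnd.of_cons)]
    by_cases hk : t = k
    · subst hk
      have : t ∉ ks := by simpa using (List.nodup_cons.mp hnd).1
      simp [this]
    · simp [PySem.Dict.getD_insert, hk, List.mem_cons]

lemma head_sorted_eq_min (L : List String) (hL : L ≠ []) :
    PySem.List.pyGet? (PySem.List.sorted L (fun x => x) false) 0 = PySem.List.min? L (fun x => x) := by
  rcases hs : PySem.List.sorted L (fun x => x) false with _ | ⟨m, t⟩
  · exact absurd ((PySem.List.sorted_eq_nil_iff L _ false).mp hs) hL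
  rcases hm : PySem.List.min? L (fun x => x) with _ | m'
  · exact absurd ((PySem.List.min?_eq_none_iff L _).mp hm) hL
  have hmem_m : m ∈ L := (PySem.List.sorted_perm L (fun x => x) false).mem_iff.mp (by rw [hs]; exact List.mem_cons_self)
  have h1 : m ≤ m' := PySem.List.key_head_sorted_le L (fun x => x) hs m' (PySem.List.min?_mem hm)
  have h2 : m' ≤ m := PySem.List.min?_isMin hm m hmem_m
  simp [PySem.List.pyGet?, PySem.List.pyIdx?, le_antisymm h1 h2]

theorem ports_agree : ∀ (xs : List (String × Int)) (n : Int),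
    return_smallest_key xs n = return_smallest_key_alt xs n := by
  intro xs n
  unfold return_smallest_key return_smallest_key_alt
  set d := PySem.Dict.ofList xs with hd
  by_cases hg : d.size = 0 ∨ n ≤ 0
  · simp [hg]
  simp only [hg, if_false]
  set rm := d.items.foldl (fun rm p => rm.modify p.2 [] (· ++ [p.1])) PySem.Dict.empty with hrm
  have hkeys : rm.keys = PySem.Set.ofList d.values := by
    rw [hrm, PySem.Dict.keys_foldl_modify_key d.items (fun p => p.2) [] (fun _ p l => l ++ [p.1])]
    simp only [PySem.Dict.keys_empty, PySem.Set.update_nil_left, PySem.Dict.values]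
  have hnodup : rm.keys.Nodup := by
    rw [hkeys]; exact PySem.Set.nodup_ofList _
  set rm2 := rm.keys.foldl (fun acc k => acc.insert k (PySem.List.sorted (acc.getD k []) (fun x => x) false)) rm with hrm2
  have hkeys2 : rm2.keys = rm.keys := by
    rw [hrm2, PySem.Dict.keys_foldl_insert, PySem.Set.update_eq_append_filter]
    have hfil : List.filter (fun y => !PySem.Set.contains rm.keys y) (PySem.Set.ofList rm.keys) = [] := by
      apply List.filter_eq_nil_iff.mpr
      intro a ha
      simpa using (PySem.Set.mem_ofList _ _).mp ha
    rw [hfil, List.append_nil]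
  rw [hkeys2, hkeys]
  by_cases hlen : ((PySem.Set.ofList d.values).length : Int) < n
  · simp [PySem.List.length_sorted, hlen]
  simp only [PySem.List.length_sorted, if_neg hlen]
  rcases hget : PySem.List.pyGet? (PySem.List.sorted (PySem.Set.ofList d.values) (fun x => x) false) (n - 1) with _ | v
  · rfl
  have hvmem : v ∈ d.values := by
    have := PySem.List.mem_of_pyGet?_eq_some _ hget
    exact (PySem.Set.mem_ofList _ _).mp (((PySem.List.sorted_perm _ _ _).mem_iff).mp this)
  have hvkeys : v ∈ rm.keys := by rw [hkeys]; exact (PySem.Set.mem_ofList _ _).mpr hvmem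
  have hgd2 : rm2.getD v [] = PySem.List.sorted (rm.getD v []) (fun x => x) false := by
    rw [hrm2, getD_sortloop _ _ _ hnodup, if_pos hvkeys]
  have hgd1 : rm.getD v [] = (d.items.filter (fun p => p.2 == v)).map (fun p => p.1) := by
    rw [hrm]
    have hswap : d.items.foldl (fun rm p => rm.modify p.2 [] (· ++ [p.1])) PySem.Dict.empty
        = (d.items.map Prod.swap).foldl (fun rm p => rm.modify p.1 [] (· ++ [p.2])) PySem.Dict.empty := by
      rw [List.foldl_map]
      simp [Prod.swap]
    rw [hswap, PySem.Dict.getD_foldl_modify_append]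
    simp [List.filter_map, Function.comp_def, Prod.swap]
  have hLne : (d.items.filter (fun p => p.2 == v)).map (fun p => p.1) ≠ [] := by
    simp only [PySem.Dict.values] at hvmem
    obtain ⟨p, hp, hpv⟩ := List.mem_map.mp hvmem
    intro hnil
    have : p ∈ d.items.filter (fun p => p.2 == v) := List.mem_filter.mpr ⟨hp, by simp [hpv]⟩
    simp [List.map_eq_nil_iff.mp hnil] at this
  dsimp only
  rw [hgd2, hgd1, head_sorted_eq_min _ hLne]

-- ===== VERDICT (by name: the statement is the Claim_ definition above) =====
theorem return_smallest_key_spec : Claim_equal_return_smallest_key := by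
  intro xs n _
  unfold Spec_return_smallest_key
  exact ports_agree xs n
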